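-- pv_equiv track=rewrite | github.com/UNI-FIIS-BIC01/solucion-segundo-taller | contador.py | contador_letras
-- ===== SOURCE A (Python) =====
-- import string
--
-- def contador_letras(cadena_de_caracteres):
--     """
--     cadena_de_caracteres: string
--     resultado: Lista de tuplas
--     """
--
--     cadena_de_caracteres = cadena_de_caracteres.lower()
--
--     resultado = []
--     todas_las_letras = string.ascii_lowercase
--
--     for letra in todas_las_letras:
--         frecuencia = 0
--         # "habas"
--         for letra_cadena in cadena_de_caracteres:
--             if letra_cadena == letra:
--                 frecuencia += 1
--
--         if frecuencia > 0:
--             tupla_frecuencias = (letra, frecuencia)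
--             resultado.append(tupla_frecuencias)
--
--     return resultado
-- ===== SOURCE B (Python) =====
-- def contador_letras(cadena_de_caracteres):
--     """
--     cadena_de_caracteres: string
--     resultado: Lista de tuplas
--     """
--     counts = [0] * 26
--     for ch in cadena_de_caracteres.lower():
--         i = ord(ch) - 97
--         if 0 <= i < 26:
--             counts[i] += 1
--     return [(chr(97 + i), c) for i, c in enumerate(counts) if c > 0]
-- ===== Notes on version B (the rewrite author's own statement) =====
-- stated objective: faster
-- what changed: Replaces the 26 nested scans of the string (one per alphabet letter) with a single pass that tallies into a 26-slot count array, then emits the non-zero counts in index (= alphabetical) order.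
import Mathlib
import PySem

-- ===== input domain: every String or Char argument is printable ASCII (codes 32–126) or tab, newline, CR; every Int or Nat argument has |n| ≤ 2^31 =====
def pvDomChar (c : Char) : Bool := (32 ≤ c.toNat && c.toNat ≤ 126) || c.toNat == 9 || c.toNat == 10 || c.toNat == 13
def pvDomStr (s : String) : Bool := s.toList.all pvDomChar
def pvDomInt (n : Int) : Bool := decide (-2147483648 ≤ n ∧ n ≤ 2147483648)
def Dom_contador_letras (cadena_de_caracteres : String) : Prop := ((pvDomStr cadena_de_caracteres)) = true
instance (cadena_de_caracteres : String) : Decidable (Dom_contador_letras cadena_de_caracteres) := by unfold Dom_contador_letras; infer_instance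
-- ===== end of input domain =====

-- B replaces A's 26 full scans of the string (one per alphabet letter) with a single
-- tallying pass into a 26-slot count array; objective: faster (constant factor).

-- ===== PORT A =====
def contador_letras (cadena_de_caracteres : String) : List (String × Int) :=
  let cs := (PySem.Str.lower cadena_de_caracteres).toList
  "abcdefghijklmnopqrstuvwxyz".toList.foldl
    (fun resultado letra =>
      let frecuencia : Int := cs.foldl (fun f letra_cadena => if letra_cadena == letra then f + 1 else f) 0
      if frecuencia > 0 then resultado ++ [(String.singleton letra, frecuencia)] else resultado)
    []

-- ===== PORT B =====
def contador_letras_alt (cadena_de_caracteres : String) : List (String × Int) :=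
  let counts : List Int :=
    (PySem.Str.lower cadena_de_caracteres).toList.foldl
      (fun counts ch =>
        let i : Int := (ch.toNat : Int) - 97
        if 0 ≤ i ∧ i < 26 then counts.set i.toNat (counts.getD i.toNat 0 + 1) else counts)
      (List.replicate 26 0)
  (PySem.List.enumerate counts).filterMap
    (fun p => if p.2 > 0 then some (String.singleton (Char.ofNat (97 + p.1).toNat), p.2) else none)

-- ===== PRECONDITION & SPEC =====
def Spec_contador_letras (cadena_de_caracteres : String) (out : List (String × Int)) : Prop := out = contador_letras_alt cadena_de_caracteres
instance (cadena_de_caracteres : String) (out : List (String × Int)) : Decidable (Spec_contador_letras cadena_de_caracteres out) := by unfold Spec_contador_letras; infer_instance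

-- ===== CLAIM (what is proved, stated in full; the proofs are below) =====
def Claim_equal_contador_letras : Prop := ∀ (cadena_de_caracteres : String), Dom_contador_letras cadena_de_caracteres → Spec_contador_letras cadena_de_caracteres (contador_letras cadena_de_caracteres)

-- ===== LEMMAS AND PROOFS =====

-- the 26 alphabet letters, and B's tallying step, named for the proofs
def pvAlpha : List Char := "abcdefghijklmnopqrstuvwxyz".toList

def pvStep (counts : List Int) (ch : Char) : List Int :=
  if 0 ≤ (ch.toNat : Int) - 97 ∧ (ch.toNat : Int) - 97 < 26 then
    counts.set ((ch.toNat : Int) - 97).toNat (counts.getD ((ch.toNat : Int) - 97).toNat 0 + 1)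
  else counts

lemma pvStep_length (arr : List Int) (c : Char) : (pvStep arr c).length = arr.length := by
  unfold pvStep; split <;> simp

lemma pvFold_length (cs : List Char) : ∀ arr : List Int, (cs.foldl pvStep arr).length = arr.length := by
  induction cs with
  | nil => intro arr; rfl
  | cons c cs ih => intro arr; simpa [pvStep_length] using ih (pvStep arr c)

lemma pvToNat_ofNat {j : Nat} (hj : j < 26) : (Char.ofNat (97 + j)).toNat = 97 + j := by
  rw [Char.toNat_ofNat]
  have : (97 + j).isValidChar := Or.inl (by omega)
  simp [this]

lemma pvStep_getD (arr : List Int) (c : Char) (hlen : arr.length = 26) {j : Nat} (hj : j < 26) :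
    (pvStep arr c).getD j 0 = arr.getD j 0 + (if c == Char.ofNat (97 + j) then (1:Int) else 0) := by
  have hcv : (Char.ofNat (97 + j)).toNat = 97 + j := pvToNat_ofNat hj
  unfold pvStep
  by_cases h : 0 ≤ (c.toNat : Int) - 97 ∧ (c.toNat : Int) - 97 < 26
  · rw [if_pos h]
    have h97 : 97 ≤ c.toNat := by omega
    have hkn : ((c.toNat : Int) - 97).toNat = c.toNat - 97 := by omega
    by_cases hje : c.toNat - 97 = j
    · have hc : c = Char.ofNat (97 + j) := by
        apply Char.ext; apply UInt32.toNat_inj.mp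
        show c.toNat = (Char.ofNat (97 + j)).toNat
        omega
      rw [hkn, hje]
      simp [List.getD_eq_getElem?_getD, hlen, hj, hc]
    · have hne : ¬(c = Char.ofNat (97 + j)) := by
        intro hc; apply hje; rw [hc] at h97 ⊢; omega
      rw [hkn]
      simp [List.getD_eq_getElem?_getD, List.getElem?_set_ne, hje, hne]
  · have hne : ¬(c = Char.ofNat (97 + j)) := by
      intro hc; rw [hc] at h; omega
    rw [if_neg h]
    simp [hne]

lemma pvFold_getD (cs : List Char) : ∀ arr : List Int, arr.length = 26 → ∀ j : Nat, j < 26 →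
    (cs.foldl pvStep arr).getD j 0 = arr.getD j 0 + (cs.countP (· == Char.ofNat (97 + j)) : Int) := by
  induction cs with
  | nil => intro arr _ j _; simp
  | cons c cs ih =>
    intro arr hlen j hj
    have hlen2 : (pvStep arr c).length = 26 := by rw [pvStep_length, hlen]
    calc ((c :: cs).foldl pvStep arr).getD j 0
        = (pvStep arr c).getD j 0 + (cs.countP (· == Char.ofNat (97 + j)) : Int) := ih (pvStep arr c) hlen2 j hj
      _ = arr.getD j 0 + ((c :: cs).countP (· == Char.ofNat (97 + j)) : Int) := by
          rw [pvStep_getD arr c hlen hj, List.countP_cons]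
          by_cases hc : c == Char.ofNat (97 + j) <;> simp [hc] ; ring

lemma pvAlpha_getElem? : ∀ j : Nat, j < 26 → pvAlpha[j]? = some (Char.ofNat (97 + j)) := by decide

-- the tally list equals the per-letter counts laid out over the alphabet
lemma pvCounts_eq (cs : List Char) :
    cs.foldl pvStep (List.replicate 26 0) = pvAlpha.map (fun c => (cs.countP (· == c) : Int)) := by
  have hlenL : (cs.foldl pvStep (List.replicate 26 (0:Int))).length = 26 := by
    rw [pvFold_length]; rfl
  apply List.ext_getElem?
  intro j
  rw [List.getElem?_map]
  by_cases hj : j < 26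
  · rw [pvAlpha_getElem? j hj, Option.map_some]
    cases hlv : (cs.foldl pvStep (List.replicate 26 0))[j]? with
    | none => exact absurd (List.getElem?_eq_none_iff.mp hlv) (by omega)
    | some v =>
      have hgd := pvFold_getD cs (List.replicate 26 0) (by simp) j hj
      rw [List.getD_eq_getElem?_getD, hlv, List.getD_eq_getElem?_getD,
          List.getElem?_replicate_of_lt hj] at hgd
      simp only [Option.getD_some] at hgd
      rw [hgd]; norm_num
  · have h1 : (cs.foldl pvStep (List.replicate 26 0))[j]? = none :=
      List.getElem?_eq_none_iff.mpr (by omega)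
    have h2 : pvAlpha[j]? = none :=
      List.getElem?_eq_none_iff.mpr (by simp [pvAlpha]; omega)
    rw [h1, h2]; rfl

lemma pvEnumerate_map {α β : Type} (g : α → β) : ∀ (l : List α) (s : Int),
    PySem.List.enumerate (l.map g) s = (PySem.List.enumerate l s).map (fun p => (p.1, g p.2)) := by
  intro l
  induction l with
  | nil => intro s; rfl
  | cons x xs ih => intro s; simp [PySem.List.enumerate_cons, ih]

-- A's append-if fold over the alphabet equals B's filterMap over the enumerated tallies,
-- provided each enumerated index names its letter (97 + index = letter code)
lemma pvBridge (cnt : Char → Int) : ∀ (l : List Char) (s : Int) (acc : List (String × Int)),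
    (∀ p ∈ PySem.List.enumerate l s, Char.ofNat (97 + p.1).toNat = p.2) →
    l.foldl (fun res c => if cnt c > 0 then res ++ [(String.singleton c, cnt c)] else res) acc
      = acc ++ (((PySem.List.enumerate l s).map (fun p => (p.1, cnt p.2))).filterMap
          (fun p => if p.2 > 0 then some (String.singleton (Char.ofNat (97 + p.1).toNat), p.2) else none)) := by
  intro l
  induction l with
  | nil => intro s acc _; simp [PySem.List.enumerate]
  | cons c l ih =>
    intro s acc hidx
    have hc : Char.ofNat (97 + s).toNat = c := hidx (s, c) (by simp [PySem.List.enumerate_cons])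
    have hrest : ∀ p ∈ PySem.List.enumerate l (s + 1), Char.ofNat (97 + p.1).toNat = p.2 := by
      intro p hp; exact hidx p (by simp [PySem.List.enumerate_cons, hp])
    simp only [PySem.List.enumerate_cons, List.foldl_cons, List.map_cons, List.filterMap_cons]
    by_cases hpos : cnt c > 0
    · simp only [hpos, if_pos, hc]
      rw [ih (s + 1) (acc ++ [(String.singleton c, cnt c)]) hrest]
      simp
    · simp only [hpos, if_neg, not_false_iff]
      exact ih (s + 1) acc hrest

lemma pvEnum_alpha_idx : ∀ p ∈ PySem.List.enumerate pvAlpha 0, Char.ofNat (97 + p.1).toNat = p.2 := by decide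

-- ===== VERDICT (by name: the statement is the Claim_ definition above) =====
theorem contador_letras_spec : Claim_equal_contador_letras := by
  intro s _
  show contador_letras s = contador_letras_alt s
  unfold contador_letras contador_letras_alt
  simp only []
  rw [show (fun (counts : List Int) (ch : Char) =>
        let i : Int := (ch.toNat : Int) - 97
        if 0 ≤ i ∧ i < 26 then counts.set i.toNat (counts.getD i.toNat 0 + 1) else counts) = pvStep from rfl]
  rw [pvCounts_eq, pvEnumerate_map]
  rw [show "abcdefghijklmnopqrstuvwxyz".toList = pvAlpha from rfl]
  simp only [PySem.List.foldl_count_if, zero_add]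
  have hb := pvBridge (fun c => ((PySem.Str.lower s).toList.countP (· == c) : Int)) pvAlpha 0 [] pvEnum_alpha_idx
  rw [List.nil_append] at hb
  exact hb
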